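-- pv_equiv track=rewrite | github.com/TomHosk/StegH | modules/bitmap.py | get_lsb_masks
-- ===== SOURCE A (Python) =====
-- def get_lsb_masks(rgba_masks):
--     """Creates a list of bitmasks with each representing the least
--     significant bit of one of the rgba channels of a bitmap.
--
--     Arguments:
--         rgba_masks: list
--             List of rgba bitfields of channels used by the bitmap, as
--             integers.
--     Returns:
--         List of bitmasks for each least significant bit, as integers.
--     """
--     lsb_masks = []
--     for mask in rgba_masks:
--         if mask == 0:
--             continue
--         bit = 1
--         while bit & mask == 0:
--             bit = bit << 1
--         lsb_masks.append(bit)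
--     return lsb_masks
-- ===== SOURCE B (Python) =====
-- def get_lsb_masks(rgba_masks):
--     """Creates a list of bitmasks with each representing the least
--     significant bit of one of the rgba channels of a bitmap."""
--     return [mask & -mask for mask in rgba_masks if mask != 0]
-- ===== Notes on version B (the rewrite author's own statement) =====
-- stated objective: idiomatic
-- what changed: Replaces the per-element shift-and-test while loop with the closed-form lowest-set-bit idiom mask & -mask inside a single list comprehension.
import Mathlib
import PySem

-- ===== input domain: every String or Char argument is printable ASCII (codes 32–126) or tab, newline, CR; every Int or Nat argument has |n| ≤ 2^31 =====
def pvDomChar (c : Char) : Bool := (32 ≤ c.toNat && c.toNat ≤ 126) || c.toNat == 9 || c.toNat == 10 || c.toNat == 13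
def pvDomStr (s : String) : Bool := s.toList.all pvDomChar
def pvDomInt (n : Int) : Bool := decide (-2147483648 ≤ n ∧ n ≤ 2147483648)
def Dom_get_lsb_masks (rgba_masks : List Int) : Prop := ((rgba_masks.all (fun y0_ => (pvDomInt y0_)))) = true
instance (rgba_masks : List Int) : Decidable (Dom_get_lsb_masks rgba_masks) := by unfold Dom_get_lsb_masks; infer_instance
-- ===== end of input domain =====

-- B replaces A's per-mask shift-and-test while loop by the closed-form lowest-set-bit idiom
-- mask & -mask inside a single list comprehension (objective: idiomatic).

-- ===== PORT A =====
-- the `while bit & mask == 0: bit = bit << 1` loop; the fuel argument only makes it total in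
-- Lean (for mask ≠ 0, fuel = mask.natAbs always suffices and the 0-case is never reached);
-- `bit << 1` is exactly `bit * 2`, `&` is PySem.Int.band
def lsbLoopA (fuel : Nat) (bit : Int) (mask : Int) : Int :=
  match fuel with
  | 0 => bit
  | f + 1 => if PySem.Int.band bit mask == 0 then lsbLoopA f (bit * 2) mask else bit

def get_lsb_masks (rgba_masks : List Int) : List Int :=
  rgba_masks.foldl
    (fun lsb_masks mask =>
      if mask == 0 then lsb_masks
      else lsb_masks ++ [lsbLoopA mask.natAbs 1 mask])
    []

-- ===== PORT B =====
def get_lsb_masks_alt (rgba_masks : List Int) : List Int :=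
  (rgba_masks.filter (fun mask => mask != 0)).map (fun mask => PySem.Int.band mask (-mask))

-- ===== PRECONDITION & SPEC =====
def Spec_get_lsb_masks (rgba_masks : List Int) (out : List Int) : Prop := out = get_lsb_masks_alt rgba_masks
instance (rgba_masks : List Int) (out : List Int) : Decidable (Spec_get_lsb_masks rgba_masks out) := by unfold Spec_get_lsb_masks; infer_instance

-- ===== CLAIM (what is proved, stated in full; the proofs are below) =====
def Claim_equal_get_lsb_masks : Prop := ∀ (rgba_masks : List Int), Dom_get_lsb_masks rgba_masks → Spec_get_lsb_masks rgba_masks (get_lsb_masks rgba_masks)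

-- ===== LEMMAS AND PROOFS =====

-- testBit of n = 2^t * o (o odd) at positions k ≤ t: set exactly at t
theorem testBit_low (t o k : ℕ) (ho : o % 2 = 1) (hk : k ≤ t) :
    (2 ^ t * o).testBit k = decide (k = t) := by
  have hdiv : (2 ^ t * o) / 2 ^ k = 2 ^ (t - k) * o := by
    have h : 2 ^ t * o = 2 ^ k * (2 ^ (t - k) * o) := by
      rw [← Nat.mul_assoc, ← pow_add]; congr 2; omega
    rw [h, Nat.mul_div_cancel_left _ (Nat.two_pow_pos k)]
  rw [Nat.testBit_eq_decide_div_mod_eq, hdiv]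
  rcases Nat.lt_or_ge k t with h | h
  · have h2 : 2 ^ (t - k) * o % 2 = 0 := by
      obtain ⟨c, hc⟩ : (2 : ℕ) ∣ 2 ^ (t - k) := dvd_pow_self 2 (by omega)
      rw [(by rw [hc]; ring : 2 ^ (t - k) * o = 2 * (c * o)), Nat.mul_mod_right]
    simp [h2, Nat.ne_of_lt h]
  · have hkt : k = t := le_antisymm hk h
    subst hkt
    simp [ho]

-- testBit of n - 1 at positions k ≤ t: set exactly below t
theorem testBit_pred_low (t o k : ℕ) (ho : o % 2 = 1) (hk : k ≤ t) :
    (2 ^ t * o - 1).testBit k = decide (k < t) := by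
  have hq1 : 1 ≤ 2 ^ (t - k) * o := Nat.mul_pos (Nat.two_pow_pos _) (by omega)
  have hk1 : (1 : ℕ) ≤ 2 ^ k := Nat.one_le_two_pow
  have hexp : 2 ^ k * (2 ^ (t - k) * o) = 2 ^ t * o := by
    rw [← Nat.mul_assoc, ← pow_add]; congr 2; omega
  have hmul : 2 ^ k * (2 ^ (t - k) * o - 1) = 2 ^ t * o - 2 ^ k := by
    rw [Nat.mul_sub, Nat.mul_one, hexp]
  have hsplit : 2 ^ t * o - 1 = 2 ^ k * (2 ^ (t - k) * o - 1) + (2 ^ k - 1) := by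
    have hle : 2 ^ k ≤ 2 ^ t * o := by
      calc 2 ^ k ≤ 2 ^ k * (2 ^ (t - k) * o) := Nat.le_mul_of_pos_right _ (by omega)
        _ = 2 ^ t * o := hexp
    omega
  have hdiv : (2 ^ t * o - 1) / 2 ^ k = 2 ^ (t - k) * o - 1 := by
    rw [hsplit, Nat.mul_add_div (Nat.two_pow_pos k)]
    have h0 : (2 ^ k - 1) / 2 ^ k = 0 := Nat.div_eq_of_lt (by omega)
    rw [h0]
    omega
  rw [Nat.testBit_eq_decide_div_mod_eq, hdiv]
  rcases Nat.lt_or_ge k t with h | h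
  · have heven : 2 ^ (t - k) * o % 2 = 0 := by
      obtain ⟨c, hc⟩ : (2 : ℕ) ∣ 2 ^ (t - k) := dvd_pow_self 2 (by omega)
      rw [(by rw [hc]; ring : 2 ^ (t - k) * o = 2 * (c * o)), Nat.mul_mod_right]
    have hodd : (2 ^ (t - k) * o - 1) % 2 = 1 := by omega
    simp [hodd, h]
  · have hkt : k = t := le_antisymm hk h
    subst hkt
    have : (2 ^ (0 : ℕ) * o - 1) % 2 = 0 := by simpa using (by omega : (o - 1) % 2 = 0)
    simp only [Nat.sub_self, pow_zero, Nat.one_mul]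
    simp [(by omega : (o - 1) % 2 = 0)]

-- above position t, subtracting 1 does not change the bits
theorem testBit_pred_high (t o k : ℕ) (ho : o % 2 = 1) (hk : t < k) :
    (2 ^ t * o - 1).testBit k = (2 ^ t * o).testBit k := by
  have hr : 2 ^ t * o % 2 ^ k ≠ 0 := by
    intro h
    have hdvd : (2 : ℕ) ^ k ∣ 2 ^ t * o := Nat.dvd_of_mod_eq_zero h
    have h2 : (2 : ℕ) ^ (t + 1) ∣ 2 ^ t * o :=
      dvd_trans (Nat.pow_dvd_pow 2 (by omega)) hdvd
    have h3 : (2 : ℕ) ∣ o := by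
      rcases h2 with ⟨c, hc⟩
      rw [pow_succ] at hc
      refine ⟨c, ?_⟩
      have hpos : 0 < (2 : ℕ) ^ t := Nat.two_pow_pos t
      have hc' : 2 ^ t * o = 2 ^ t * (2 * c) := by rw [hc]; ring
      exact Nat.eq_of_mul_eq_mul_left hpos hc'
    omega
  have hmod := Nat.div_add_mod (2 ^ t * o) (2 ^ k)
  have hlt : 2 ^ t * o % 2 ^ k < 2 ^ k := Nat.mod_lt _ (Nat.two_pow_pos k)
  have hdiv : (2 ^ t * o - 1) / 2 ^ k = (2 ^ t * o) / 2 ^ k := by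
    have hsplit : 2 ^ t * o - 1 = 2 ^ k * ((2 ^ t * o) / 2 ^ k) + (2 ^ t * o % 2 ^ k - 1) := by
      omega
    rw [hsplit, Nat.mul_add_div (Nat.two_pow_pos k)]
    have h0 : (2 ^ t * o % 2 ^ k - 1) / 2 ^ k = 0 := Nat.div_eq_of_lt (by omega)
    rw [h0]
    omega
  rw [Nat.testBit_eq_decide_div_mod_eq, Nat.testBit_eq_decide_div_mod_eq, hdiv]

-- n AND (n - 1) clears exactly the lowest set bit
theorem land_pred (t o : ℕ) (ho : o % 2 = 1) :
    (2 ^ t * o) &&& (2 ^ t * o - 1) = 2 ^ t * (o - 1) := by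
  obtain ⟨u, hu⟩ : ∃ u, o - 1 = 2 * u := ⟨(o - 1) / 2, by omega⟩
  apply Nat.eq_of_testBit_eq
  intro k
  rw [Nat.testBit_and]
  have hrhs : 2 ^ t * (o - 1) = u * 2 ^ (t + 1) := by
    rw [hu, pow_succ]; ring
  rcases Nat.lt_or_ge t k with h | h
  · rw [testBit_pred_high t o k ho h, Bool.and_self, hrhs, Nat.testBit_mul_two_pow,
        (by rw [mul_comm] : (2 : ℕ) ^ t * o = o * 2 ^ t), Nat.testBit_mul_two_pow]
    have h1 : (decide (t ≤ k)) = true := by simp [le_of_lt h]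
    have h2 : (decide (t + 1 ≤ k)) = true := by simp [h]
    rw [h1, h2, Bool.true_and, Bool.true_and]
    have hko : o.testBit (k - t) = u.testBit (k - t - 1) := by
      have hi : k - t = (k - t - 1) + 1 := by omega
      rw [hi, Nat.testBit_add_one, (by omega : o / 2 = u)]
      congr 1
    rw [hko]
    congr 1
  · rw [testBit_low t o k ho h, testBit_pred_low t o k ho h, hrhs,
        Nat.testBit_mul_two_pow]
    have h2 : ¬ (t + 1 ≤ k) := by omega
    by_cases hkt : k = t
    · simp [hkt]
    · simp [hkt, h2]

-- the loop condition: (2^j) & m = 0 iff j is strictly below the lowest set bit of m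
theorem band_two_pow_eq_zero_iff (m : Int) (t o j : ℕ) (ho : o % 2 = 1)
    (hm : m ≠ 0) (hn : m.natAbs = 2 ^ t * o) (hj : j ≤ t) :
    (PySem.Int.band (((2 ^ j : ℕ) : Int)) m = 0) ↔ j < t := by
  have hp : (0 : Int) ≤ ((2 ^ j : ℕ) : Int) := Int.natCast_nonneg _
  rcases lt_or_gt_of_ne hm with hneg | hpos
  · have hnn : ¬ (0 : Int) ≤ m := by omega
    have htn : (-m - 1).toNat = 2 ^ t * o - 1 := by omega
    rw [PySem.Int.band, if_pos hp, if_neg hnn]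
    rw [Int.toNat_natCast, htn, Nat.two_pow_and, testBit_pred_low t o j ho hj]
    rcases Nat.lt_or_ge j t with h | h
    · have hd : (decide (j < t)).toNat = 1 := by simp [h]
      rw [hd]
      simp [h]
    · have hjt : j = t := le_antisymm hj h
      subst hjt
      have hd : (decide (j < j)).toNat = 0 := by simp
      rw [hd]
      simp
  · have hnn : (0 : Int) ≤ m := by omega
    have htn : m.toNat = 2 ^ t * o := by omega
    rw [PySem.Int.band, if_pos hp, if_pos hnn]
    rw [Int.toNat_natCast, htn, Nat.two_pow_and, testBit_low t o j ho hj]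
    have h2 : (2 : ℕ) ^ j ≠ 0 := by positivity
    rcases Nat.lt_or_ge j t with h | h
    · have hd : (decide (j = t)).toNat = 0 := by simp [Nat.ne_of_lt h]
      rw [hd]
      simpa using h
    · have hjt : j = t := le_antisymm hj h
      subst hjt
      simp

-- B's closed form: m & -m is the lowest set bit 2^t
theorem band_neg_self (m : Int) (t o : ℕ) (ho : o % 2 = 1)
    (hm : m ≠ 0) (hn : m.natAbs = 2 ^ t * o) :
    PySem.Int.band m (-m) = (((2 ^ t : ℕ) : Int)) := by
  have hkey : 2 ^ t * o - (2 ^ t * o &&& (2 ^ t * o - 1)) = 2 ^ t := by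
    have hle : 2 ^ t ≤ 2 ^ t * o := Nat.le_mul_of_pos_right _ (by omega)
    have hmul : 2 ^ t * (o - 1) = 2 ^ t * o - 2 ^ t := by
      rw [Nat.mul_sub, Nat.mul_one]
    rw [land_pred t o ho, hmul]
    exact Nat.sub_sub_self hle
  rcases lt_or_gt_of_ne hm with hneg | hpos
  · have h1 : ¬ (0 : Int) ≤ m := by omega
    have h2 : (0 : Int) ≤ -m := by omega
    have e1 : (-m).toNat = 2 ^ t * o := by omega
    have e2 : (-m - 1).toNat = 2 ^ t * o - 1 := by omega
    rw [PySem.Int.band, if_neg h1, if_pos h2, e1, e2, hkey]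
  · have h1 : (0 : Int) ≤ m := by omega
    have h2 : ¬ (0 : Int) ≤ -m := by omega
    have e1 : m.toNat = 2 ^ t * o := by omega
    have e2 : (-(-m) - 1).toNat = 2 ^ t * o - 1 := by omega
    rw [PySem.Int.band, if_pos h1, if_neg h2, e1, e2, hkey]

-- A's while loop, from bit = 2^j, returns 2^t
theorem lsbLoopA_eq (m : Int) (t o : ℕ) (ho : o % 2 = 1) (hm : m ≠ 0)
    (hn : m.natAbs = 2 ^ t * o) :
    ∀ fuel j, j ≤ t → t - j < fuel →
      lsbLoopA fuel (((2 ^ j : ℕ) : Int)) m = (((2 ^ t : ℕ) : Int)) := by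
  intro fuel
  induction fuel with
  | zero => intro j _ h; omega
  | succ f ih =>
    intro j hj hfuel
    rw [lsbLoopA]
    rcases Nat.lt_or_ge j t with h | h
    · have hc : PySem.Int.band (((2 ^ j : ℕ) : Int)) m = 0 :=
        (band_two_pow_eq_zero_iff m t o j ho hm hn hj).mpr h
      have hcb : (PySem.Int.band (((2 ^ j : ℕ) : Int)) m == 0) = true := by
        rw [beq_iff_eq]; exact hc
      rw [if_pos hcb]
      have harg : (((2 ^ j : ℕ) : Int)) * 2 = (((2 ^ (j + 1) : ℕ) : Int)) := by
        push_cast; ring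
      rw [harg]
      exact ih (j + 1) (by omega) (by omega)
    · have hjt : j = t := le_antisymm hj h
      subst hjt
      have hc : ¬ PySem.Int.band (((2 ^ j : ℕ) : Int)) m = 0 := fun h0 =>
        absurd ((band_two_pow_eq_zero_iff m j o j ho hm hn le_rfl).mp h0) (lt_irrefl j)
      have hcb : (PySem.Int.band (((2 ^ j : ℕ) : Int)) m == 0) = false :=
        beq_eq_false_iff_ne.mpr hc
      simp only [hcb, Bool.false_eq_true, if_false]

-- per-element agreement: A's loop computes m & -m for every m ≠ 0
theorem inner_eq (m : Int) (hm : m ≠ 0) :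
    lsbLoopA m.natAbs 1 m = PySem.Int.band m (-m) := by
  have hn0 : m.natAbs ≠ 0 := fun h => hm (Int.natAbs_eq_zero.mp h)
  obtain ⟨t, o, hodd, hn⟩ := Nat.exists_eq_two_pow_mul_odd hn0
  have ho : o % 2 = 1 := Nat.odd_iff.mp hodd
  have htn : t < m.natAbs := by
    have h1 : t < 2 ^ t := Nat.lt_two_pow_self
    have h2 : 2 ^ t ≤ 2 ^ t * o := Nat.le_mul_of_pos_right _ (by omega)
    omega
  have h1 : (1 : Int) = (((2 ^ (0 : ℕ) : ℕ) : Int)) := by norm_num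
  rw [h1, lsbLoopA_eq m t o ho hm hn m.natAbs 0 (by omega) (by omega),
      band_neg_self m t o ho hm hn]

-- list level: A's foldl with accumulator equals acc ++ B's filter-map
theorem foldl_eq (l : List Int) : ∀ acc : List Int,
    l.foldl (fun lsb_masks mask =>
      if mask == 0 then lsb_masks
      else lsb_masks ++ [lsbLoopA mask.natAbs 1 mask]) acc
    = acc ++ get_lsb_masks_alt l := by
  induction l with
  | nil => intro acc; simp [get_lsb_masks_alt]
  | cons x xs ih =>
    intro acc
    by_cases hx : x = 0
    · subst hx
      simp only [List.foldl_cons, beq_self_eq_true, if_true]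
      rw [ih]
      simp [get_lsb_masks_alt]
    · have hbeq : (x == 0) = false := beq_eq_false_iff_ne.mpr hx
      simp only [List.foldl_cons, hbeq, Bool.false_eq_true, if_false]
      rw [ih]
      simp only [get_lsb_masks_alt, List.filter_cons, hbeq, bne, Bool.not_false,
        if_true, List.map_cons, inner_eq x hx, List.append_assoc, List.singleton_append]

-- ===== VERDICT (by name: the statement is the Claim_ definition above) =====
theorem get_lsb_masks_spec : Claim_equal_get_lsb_masks := by
  intro rgba_masks _
  show get_lsb_masks rgba_masks = get_lsb_masks_alt rgba_masks
  rw [get_lsb_masks, foldl_eq]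
  rfl
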